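-- pv_equiv track=rewrite | github.com/HyeJiRoh/Algorithm | 프로그래머스/0/181890. 왼쪽 오른쪽/왼쪽 오른쪽.py | solution
-- ===== SOURCE A (Python) =====
-- def solution(str_list):
--     answer = []
--     for idx in range(len(str_list)):
--         if str_list[idx] == "l":
--             answer = str_list[:idx]
--             break
--         elif str_list[idx] == "r":
--             answer = str_list[idx+1:]
--             break
--         else:
--             answer = []
--     return answer
-- ===== SOURCE B (Python) =====
-- def solution(str_list):
--     li = str_list.index("l") if "l" in str_list else None
--     ri = str_list.index("r") if "r" in str_list else None
--     if li is not None and (ri is None or li < ri):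
--         return str_list[:li]
--     if ri is not None:
--         return str_list[ri + 1:]
--     return []
-- ===== Notes on version B (the rewrite author's own statement) =====
-- stated objective: simpler
-- what changed: Replaces the manual index loop with break by two independent library first-position lookups for "l" and "r" and a comparison of the positions to pick the slice.
import Mathlib
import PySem

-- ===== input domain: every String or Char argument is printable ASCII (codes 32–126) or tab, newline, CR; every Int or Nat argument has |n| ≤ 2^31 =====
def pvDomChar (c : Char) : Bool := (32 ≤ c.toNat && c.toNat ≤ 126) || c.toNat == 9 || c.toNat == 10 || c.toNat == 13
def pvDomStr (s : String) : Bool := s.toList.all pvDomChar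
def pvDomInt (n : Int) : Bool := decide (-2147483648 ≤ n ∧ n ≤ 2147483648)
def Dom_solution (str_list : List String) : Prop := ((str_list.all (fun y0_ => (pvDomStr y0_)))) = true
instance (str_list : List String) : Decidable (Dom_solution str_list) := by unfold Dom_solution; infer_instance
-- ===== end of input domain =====

-- B replaces A's single scan-with-break by two independent first-position lookups and a position comparison (objective: simpler).

-- ===== PORT A =====
-- loop 'for idx in range(len(str_list))' with break; the slices str_list[:idx] and
-- str_list[idx+1:] with 0 ≤ idx < len are exactly take idx / drop (idx+1).
def solutionGo (str_list : List String) (idx : Nat) (answer : List String) : List String :=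
  if h : idx < str_list.length then
    if str_list[idx] = "l" then str_list.take idx
    else if str_list[idx] = "r" then str_list.drop (idx + 1)
    else solutionGo str_list (idx + 1) []
  else answer
termination_by str_list.length - idx

def solution (str_list : List String) : List String :=
  solutionGo str_list 0 []

-- ===== PORT B =====
-- li/ri are the first positions of "l"/"r" (none when absent); the match mirrors
-- Source B's branches 'li is not None and (ri is None or li < ri)' / 'ri is not None' / else.
def solution_alt (str_list : List String) : List String :=
  let li := PySem.List.index? str_list "l"
  let ri := PySem.List.index? str_list "r"
  match li, ri with
  | some i, none => str_list.take i
  | some i, some j => if i < j then str_list.take i else str_list.drop (j + 1)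
  | none, some j => str_list.drop (j + 1)
  | none, none => []

-- ===== PRECONDITION & SPEC =====
def Spec_solution (str_list : List String) (out : List String) : Prop := out = solution_alt str_list
instance (str_list : List String) (out : List String) : Decidable (Spec_solution str_list out) := by unfold Spec_solution; infer_instance

-- ===== CLAIM (what is proved, stated in full; the proofs are below) =====
def Claim_equal_solution : Prop := ∀ (str_list : List String), Dom_solution str_list → Spec_solution str_list (solution str_list)

-- ===== LEMMAS AND PROOFS =====

-- first occurrence of "l" or "r": its position and whether it is "l"
def firstLR : List String → Option (Nat × Bool)
  | [] => none
  | x :: xs =>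
    if x = "l" then some (0, true)
    else if x = "r" then some (0, false)
    else (firstLR xs).map (fun p => (p.1 + 1, p.2))

def lrResult (str_list : List String) (o : Option (Nat × Bool)) : List String :=
  match o with
  | none => []
  | some (k, true) => str_list.take k
  | some (k, false) => str_list.drop (k + 1)

theorem go_eq_aux (str_list : List String) (n : Nat) :
    ∀ idx, str_list.length - idx ≤ n →
      solutionGo str_list idx [] =
        (firstLR (str_list.drop idx)).elim []
          (fun p => lrResult str_list (some (p.1 + idx, p.2))) := by
  induction n with
  | zero =>
    intro idx hle
    rw [solutionGo, dif_neg (by omega), List.drop_eq_nil_of_le (by omega)]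
    simp [firstLR]
  | succ n ih =>
    intro idx hle
    rw [solutionGo]
    by_cases h : idx < str_list.length
    · rw [dif_pos h, List.drop_eq_getElem_cons h]
      by_cases hl : str_list[idx] = "l"
      · simp [hl, firstLR, lrResult]
      · by_cases hr : str_list[idx] = "r"
        · simp [hr, firstLR, lrResult]
        · simp only [hl, hr, if_false, ih (idx + 1) (by omega), firstLR]
          cases firstLR (str_list.drop (idx + 1)) with
          | none => simp
          | some p => simp; cases p.2 <;> simp [lrResult] <;> congr 1 <;> omega
    · rw [dif_neg h, List.drop_eq_nil_of_le (Nat.le_of_not_lt h)]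
      simp [firstLR]

theorem go_eq (str_list : List String) :
    solutionGo str_list 0 [] =
      (firstLR str_list).elim []
        (fun p => lrResult str_list (some (p.1, p.2))) := by
  have h := go_eq_aux str_list str_list.length 0 (by omega)
  simpa using h

theorem firstLR_eq (xs : List String) :
    firstLR xs =
      match PySem.List.index? xs "l", PySem.List.index? xs "r" with
      | some i, none => some (i, true)
      | some i, some j => if i < j then some (i, true) else some (j, false)
      | none, some j => some (j, false)
      | none, none => none := by
  induction xs with
  | nil => simp [firstLR, PySem.List.index?]
  | cons x xs ih =>
    by_cases hl : x = "l"
    · subst hl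
      rw [firstLR, PySem.List.index?_cons_self,
        PySem.List.index?_cons_of_ne _ (by decide : ("l" : String) ≠ "r")]
      cases PySem.List.index? xs "r" <;> simp
    · by_cases hr : x = "r"
      · subst hr
        rw [firstLR, PySem.List.index?_cons_self,
          PySem.List.index?_cons_of_ne _ (by decide : ("r" : String) ≠ "l")]
        cases PySem.List.index? xs "l" <;> simp [hl]
      · rw [firstLR, PySem.List.index?_cons_of_ne _ (Ne.symm hl ∘ Eq.symm),
          PySem.List.index?_cons_of_ne _ (Ne.symm hr ∘ Eq.symm), ih]
        cases hli : PySem.List.index? xs "l" <;> cases hri : PySem.List.index? xs "r" <;>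
          simp [hl, hr]
        rename_i i j
        by_cases hij : i < j <;> simp [hij]

theorem alt_eq (str_list : List String) :
    solution_alt str_list = lrResult str_list (firstLR str_list) := by
  rw [firstLR_eq]
  unfold solution_alt
  cases PySem.List.index? str_list "l" <;> cases PySem.List.index? str_list "r" <;>
    simp [lrResult]
  rename_i i j
  by_cases hij : i < j <;> simp [hij]

-- ===== VERDICT (by name: the statement is the Claim_ definition above) =====
theorem solution_spec : Claim_equal_solution := by
  intro str_list _
  show solution str_list = solution_alt str_list
  rw [solution, go_eq, alt_eq]
  cases firstLR str_list with
  | none => simp [lrResult]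
  | some p => simp
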